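/- GENERATED by mk_final_copies.py from the proof of the farm's unit `vorbis_decode_initial.8` (farm:vorbis_decode_initial.8.1: Lemmas.lean) as the
   re-elaboration sweep compiled it — do not edit. -/
import Asan.CheckWalk
import Vorbis.Spec.Units.vorbis_decode_initial_8

open X86 X86.User Asan Vorbis Vorbis.Spec Vorbis.Spec.vorbis_decode_initial

set_option maxRecDepth 4000
set_option maxHeartbeats 4000000

namespace Vorbis.Spec.vorbis_decode_initial_8

/-- A small non-negative dword read as an `int` is the number itself. -/
theorem sint32_small (k : Nat) (h : k < 2147483648) : sint32 k = (k : Int) := by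
  unfold sint32
  rw [if_pos h]

/-- **`Top.DecodedMode` from the reads of the final memory**: `*mode = i`, the three fields of `*f` (`mode_count`, `m->blockflag`,
the block sizes `b0`, `b1` with HD3's order), the two halves of the window as `int`s. Pure: no machine state. -/
theorem dm_of_reads {mem : Mem} {f pls ple prs pre pm i bf n : Nat} {b0 b1 : Int}
    (hi : i < 64)
    (hpm : mem.readLE (addr pm) 4 = i)
    (hmc : (i : Int) < stb_vorbis.mode_count mem f)
    (hflag : mem.readLE (addr (f + 484 + 6 * i)) 1 = bf)
    (hb0 : stb_vorbis.blocksize_0 mem f = b0)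
    (hb1 : stb_vorbis.blocksize_1 mem f = b1)
    (hn0 : bf = 0 → sint32 n = b0)
    (hn1 : bf ≠ 0 → sint32 n = b1)
    (hleft : (mem.i32 pls = 0 ∧ mem.i32 ple = sint32 n / 2) ∨
      (bf ≠ 0 ∧ mem.i32 pls = (sint32 n - b0) / 4 ∧ mem.i32 ple = (sint32 n + b0) / 4))
    (hright : (mem.i32 prs = sint32 n / 2 ∧ mem.i32 pre = sint32 n) ∨
      (bf ≠ 0 ∧ mem.i32 prs = (3 * sint32 n - b0) / 4 ∧ mem.i32 pre = (3 * sint32 n + b0) / 4)) :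
    Top.DecodedMode mem f pls ple prs pre pm := by
  have e_pm : mem.i32 pm = (i : Int) := by
    rw [Mem.i32_def]
    unfold Mem.u32
    rw [hpm]
    exact sint32_small i (by omega)
  have e_cfg : stb_vorbis.mode_config_at f (mem.i32 pm).toNat = f + 484 + 6 * i := by
    rw [e_pm]
    simp only [vacc, voff, Int.toNat_natCast]
  have e_bf : Mode.blockflag mem (f + 484 + 6 * i) = bf := by
    simp only [vacc, voff]
    unfold Mem.u8
    exact hflag
  unfold Top.DecodedMode
  rw [e_cfg, e_bf, hb0, hb1, e_pm]
  refine ⟨by omega, hmc, ?_⟩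
  by_cases hbf : bf = 0
  · rw [if_pos hbf]
    have en := hn0 hbf
    rw [en] at hleft hright
    refine ⟨Or.inl rfl, ?_, ?_⟩
    · rcases hleft with h | h
      · exact Or.inl h
      · exact absurd hbf h.1
    · rcases hright with h | h
      · exact Or.inl h
      · exact absurd hbf h.1
  · rw [if_neg hbf]
    have en := hn1 hbf
    rw [en] at hleft hright
    refine ⟨Or.inr rfl, ?_, ?_⟩
    · rcases hleft with h | h
      · exact Or.inl h
      · exact Or.inr ⟨rfl, h.2⟩
    · rcases hright with h | h
      · exact Or.inl h
      · exact Or.inr ⟨rfl, h.2⟩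

/-- The ten pairs of `Top.Apart4` of the five out-objects, as arithmetic. -/
theorem apart_pairs {a b c d e : Nat} (h : Top.Apart4 [a, b, c, d, e]) :
    (a + 4 ≤ c ∨ c + 4 ≤ a) ∧ (a + 4 ≤ d ∨ d + 4 ≤ a) ∧ (b + 4 ≤ c ∨ c + 4 ≤ b) ∧ (b + 4 ≤ d ∨ d + 4 ≤ b) ∧
      (c + 4 ≤ d ∨ d + 4 ≤ c) ∧ (c + 4 ≤ e ∨ e + 4 ≤ c) ∧ (d + 4 ≤ e ∨ e + 4 ≤ d) := by
  unfold Top.Apart4 at h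
  simp only [List.pairwise_cons, List.mem_cons, List.not_mem_nil, or_false, forall_eq_or_imp, forall_eq,
    Top.RangesApart] at h
  obtain ⟨⟨_, hac, had, _⟩, ⟨hbc, hbd, _⟩, ⟨hcd, hce⟩, hde, _⟩ := h
  exact ⟨hac, had, hbc, hbd, hcd, hce, hde⟩

/-- A dword whose `int` value is in HD3's range is that small number. -/
theorem nat_of_sint32_range (x : Nat) (hx : x < 2 ^ 32) (h0 : 64 ≤ sint32 x) (h1 : sint32 x ≤ 8192) : x ≤ 8192 := by
  unfold sint32 at h0 h1
  split at h0 <;> split at h1 <;> omega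

/-- `lea ebp, [r15 + r15*2]` of a dword `n`: `3 n` in 32 bits. -/
theorem lea3 (n : Nat) (h : n < 2 ^ 32) :
    BitVec.setWidth 32 (Word.ofBV (BitVec.ofNat 32 n) + Word.ofBV (BitVec.ofNat 32 n) * 2).toBitVec =
      BitVec.ofNat 32 (3 * n) := by
  have e2 : (2 : Word).toNat = 2 := rfl
  rw [cnt32_ofBV n h]
  apply BitVec.eq_of_toNat_eq
  rw [BitVec.toNat_setWidth, UInt64.toNat_toBitVec, UInt64.toNat_add, UInt64.toNat_mul, UInt64.toNat_ofNat', e2,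
    BitVec.toNat_ofNat]
  omega

/-- **The two values of the long arm** (`(n*3 − b0) >> 2`, `(n*3 + b0) >> 2`, lines 3197–3198) as the walker leaves them, read as
`int`s: nothing wraps for `n`, `b0 ≤ 8192` (HD3), `sar` is the floor division. -/
theorem right_long (n b : Nat) (hn : n ≤ 8192) (hb : b ≤ 8192) :
    sint32 ((BitVec.setWidth 32 (Word.ofBV (BitVec.ofNat 32 n) + Word.ofBV (BitVec.ofNat 32 n) * 2).toBitVec -
        BitVec.ofNat 32 b).sshiftRight 2).toNat = (3 * sint32 n - sint32 b) / 4 ∧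
    sint32 ((BitVec.setWidth 32 (Word.ofBV (BitVec.ofNat 32 n) + Word.ofBV (BitVec.ofNat 32 n) * 2).toBitVec +
        BitVec.ofNat 32 b).sshiftRight 2).toNat = (3 * sint32 n + sint32 b) / 4 := by
  have e3 : sint32 (3 * n) = 3 * sint32 n := by
    rw [sint32_small (3 * n) (by omega), sint32_small n (by omega)]
    omega
  have e4 : (2 : Int) ^ 2 = 4 := by decide
  rw [lea3 n (by omega), di_sub_sar (3 * n) b 2 (by omega) (by omega), di_add_sar (3 * n) b 2 (by omega) (by omega), e3, e4]
  exact ⟨rfl, rfl⟩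

/-- **The two values of the short arm** (`window_center`, `n`, lines 3200–3201) as the walker leaves them. -/
theorem right_short (w n : Nat) (hw : w < 2 ^ 32) (hn : n < 2 ^ 32) :
    sint32 (BitVec.ofNat 32 w).toNat = sint32 w ∧ sint32 (BitVec.ofNat 32 n).toNat = sint32 n := by
  rw [toNat_ofNat32 w hw, toNat_ofNat32 n hn]
  exact ⟨rfl, rfl⟩

/-- **The exit of the segment from the final state `q`** (0x1133c3, reached by `jmp` from 0x113392 and from 0x1133bc): since the
join `s` the code pushed two return addresses of check calls (`ra1`, `ra2` at `[R − 96, R − 88)`) and stored `v1` to `*p_right_start`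
(rcx) and `v2` to `*p_right_end` (r8); eax = 1. `hright` = W2's right half of the two stored values. Builds `IAtEnd`: the frame by
`IFrame.carry`, `Top.DecodedMode` by `dm_of_reads` (the fields of `*f` through the footprint, the out-objects through `Top.Apart4`). -/
theorem exit_ok {others : List Obj} {frames : List (Nat × FrameLayout)} {len : Nat} {A : Arena} {stored room : Int}
    {ysz : Nat → Nat} {u₀ u : State} {ret : Word} {i bf n : Nat} {s q : State} {ra1 ra2 v1 v2 : Nat}
    {Lay : Layout} (hLay : Lay.hi = 0x1000000)
    (hE : IEntered others frames len A stored room ysz u₀ u ret)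
    (hs : IAtRight (RunBlk A len) len u₀ u ret i bf n s)
    (q_rip : q.rip = L.vorbis_decode_initial.at_1133c3)
    (q_rsp : q.reg .rsp = u.reg .rsp - 88)
    (q_rax : q.reg .rax = Word.ofBV 1#32)
    (q_kept : RegsKept [.r15, .rbx, .rbp, .r12, .r13, .r14, .rsp, .rdi, .rax, .rcx, .rdx, .rsi, .r8, .r9, .r10, .r11,
      .r16, .r17, .r18, .r19, .r20, .r21, .r22, .r23, .r24, .r25, .r26, .r27, .r28, .r29, .r30, .r31] u q)
    (q_mem : q.mem = (((s.mem.writeLE (u.reg .rsp - 96) 8 ra1).writeLE (u.reg .rcx) 4 v1).writeLE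
      (u.reg .rsp - 96) 8 ra2).writeLE (u.reg .r8) 4 v2)
    (q_eq : Mem.EqOn 1048576 1154368 u₀.mem q.mem)
    (q_df : q.flags .df = false)
    (q_mx : q.mxcsr = s.mxcsr)
    (hv1 : v1 < 2 ^ 32) (hv2 : v2 < 2 ^ 32)
    (hright : (sint32 v1 = sint32 n / 2 ∧ sint32 v2 = sint32 n) ∨
      (bf ≠ 0 ∧ sint32 v1 = (3 * sint32 n - sint32 (u.mem.readLE (u.reg .rdi + 152) 4)) / 4 ∧
        sint32 v2 = (3 * sint32 n + sint32 (u.mem.readLE (u.reg .rdi + 152) 4)) / 4)) :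
    IAtEnd (RunBlk A len) len u₀ u ret q := by
  have he := hE.entry
  have hpre := hE.pre
  v_entry he
  have hsp := hpre.1.rsp
  obtain ⟨hsh, hinv, hpls, hple, hprs, hpre_, hpm, hapart⟩ := hpre
  have hobj := hinv.objLive
  have hwhere := hobj.where_ hsh.inv hsh.offText (by decide)
  simp only [Off.sizeof.stb_vorbis] at hwhere
  have hoff := hinv.objOff
  simp only [Off.sizeof.stb_vorbis] at hoff
  have hwls := hpls.1.where_ hsh.inv hsh.offText (by decide)
  have hwle := hple.1.where_ hsh.inv hsh.offText (by decide)
  have hwrs := hprs.1.where_ hsh.inv hsh.offText (by decide)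
  have hwre := hpre_.1.where_ hsh.inv hsh.offText (by decide)
  have hwm := hpm.1.where_ hsh.inv hsh.offText (by decide)
  obtain ⟨_, a1, a2⟩ := hpls
  obtain ⟨_, b1, b2⟩ := hple
  obtain ⟨_, c1, c2⟩ := hprs
  obtain ⟨_, d1, d2⟩ := hpre_
  obtain ⟨_, e1, e2⟩ := hpm
  -- the five out-objects lie above the own frame (they are stack objects of the callers)
  have a3 : (u.reg .rsp).toNat + 8 ≤ (u.reg .rsi).toNat := by omega
  have b3 : (u.reg .rsp).toNat + 8 ≤ (u.reg .rdx).toNat := by omega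
  have c3 : (u.reg .rsp).toNat + 8 ≤ (u.reg .rcx).toNat := by omega
  have d3 : (u.reg .rsp).toNat + 8 ≤ (u.reg .r8).toNat := by omega
  have e3 : (u.reg .rsp).toNat + 8 ≤ (u.reg .r9).toNat := by omega
  have hwf : 1154368 ≤ (u.reg .rdi).toNat ∧ (u.reg .rdi).toNat + 1808 ≤ 12582912 := ⟨hwhere.1, hwhere.2.1⟩
  clear hwls hwle hwrs hwre hwm hwhere
  clear hinv
  obtain ⟨_, _, _, _, _, hilt, hmode, hflag, hnshort, hnlong, hwc, hleft, _, hfr0⟩ := hs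
  have hsame := hfr0.same
  have hun := hfr0.un
  have hbits := hfr0.bits
  have t96 : (u.reg .rsp - 96).toNat = (u.reg .rsp).toNat - 96 := di_toNat_sub (u.reg .rsp) 96 (by omega) (by omega)
  -- what the segment wrote
  have hS : Mem.SameExcept [⟨(u.reg .rsp).toNat - 96, (u.reg .rsp).toNat - 88⟩,
      ⟨(u.reg .rcx).toNat, (u.reg .rcx).toNat + 4⟩, ⟨(u.reg .r8).toNat, (u.reg .r8).toNat + 4⟩] s.mem q.mem := by
    rw [q_mem]
    u_same
  have hunq : ShadowUntouched u.mem q.mem := by v_untouched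
  have hk := di_keep hbits hS (by
    intro w hw
    simp only [List.mem_cons, List.not_mem_nil, or_false] at hw
    rcases hw with rfl | rfl | rfl <;> simp only [] <;> omega)
  have hfrq : IFrame (RunBlk A len) len u₀ u ret
      [⟨(u.reg .rsp).toNat - 448, (u.reg .rsp).toNat⟩,
      ⟨(u.reg .rdi).toNat + 48, (u.reg .rdi).toNat + 56⟩, ⟨(u.reg .rdi).toNat + 84, (u.reg .rdi).toNat + 96⟩,
      ⟨(u.reg .rdi).toNat + 136, (u.reg .rdi).toNat + 144⟩, ⟨(u.reg .rdi).toNat + 1484, (u.reg .rdi).toNat + 1749⟩,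
      ⟨(u.reg .rdi).toNat + 1752, (u.reg .rdi).toNat + 1784⟩, ⟨(u.reg .rdi).toNat + 1796, (u.reg .rdi).toNat + 1804⟩,
      ⟨(u.reg .rsi).toNat, (u.reg .rsi).toNat + 4⟩, ⟨(u.reg .rdx).toNat, (u.reg .rdx).toNat + 4⟩,
      ⟨(u.reg .rcx).toNat, (u.reg .rcx).toNat + 4⟩, ⟨(u.reg .r8).toNat, (u.reg .r8).toNat + 4⟩,
      ⟨(u.reg .r9).toNat, (u.reg .r9).toNat + 4⟩] q := by
    refine IFrame.carry hfr0 (by omega) (by omega) hS ?_ ?_ q_eq hunq q_df ?_ hk.1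
    · intro w hw
      simp only [List.mem_cons, List.not_mem_nil, or_false] at hw
      rcases hw with rfl | rfl | rfl
      · exact ⟨_, List.mem_cons_self, by simp only []; omega, by simp only []; omega⟩
      · exact ⟨⟨(u.reg .rcx).toNat, (u.reg .rcx).toNat + 4⟩, by simp only [List.mem_cons, true_or, or_true],
          by simp only []; omega, by simp only []; omega⟩
      · exact ⟨⟨(u.reg .r8).toNat, (u.reg .r8).toNat + 4⟩, by simp only [List.mem_cons, true_or, or_true],
          by simp only []; omega, by simp only []; omega⟩
    · intro w hw
      simp only [List.mem_cons, List.not_mem_nil, or_false] at hw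
      rcases hw with rfl | rfl | rfl <;> (simp only []; omega)
    · rw [q_mx]
      exact hfr0.mx
  -- a field of `*f` off the footprint reads in the final memory as at the entry
  have hfield : ∀ off k : Nat, 144 ≤ off → off + k ≤ 1484 →
      q.mem.readLE (addr ((u.reg .rdi).toNat + off)) k = u.mem.readLE (addr ((u.reg .rdi).toNat + off)) k := by
    intro off k h1 h2
    have ea : (addr ((u.reg .rdi).toNat + off)).toNat = (u.reg .rdi).toNat + off := toNat_addr _ (by omega)
    refine hfrq.same.readLE _ k (by omega) ?_
    intro w hw
    simp only [List.mem_cons, List.not_mem_nil, or_false] at hw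
    rcases hw with rfl | rfl | rfl | rfl | rfl | rfl | rfl | rfl | rfl | rfl | rfl | rfl <;> simp only [] <;> omega
  -- an out-object the segment did not store to reads as at the join
  have hout : ∀ p : Word, 7340032 ≤ p.toNat → p.toNat + 4 ≤ 8388608 → (u.reg .rsp).toNat + 8 ≤ p.toNat →
      (p.toNat + 4 ≤ (u.reg .rcx).toNat ∨ (u.reg .rcx).toNat + 4 ≤ p.toNat) →
      (p.toNat + 4 ≤ (u.reg .r8).toNat ∨ (u.reg .r8).toNat + 4 ≤ p.toNat) →
      q.mem.readLE p 4 = s.mem.readLE p 4 := by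
    intro p h1 h2 h3 h4 h5
    clear hoff
    refine hS.readLE p 4 (by omega) ?_
    intro w hw
    simp only [List.mem_cons, List.not_mem_nil, or_false] at hw
    rcases hw with rfl | rfl | rfl <;> simp only [] <;> omega
  obtain ⟨pac, pad, pbc, pbd, pcd, pce, pde⟩ := apart_pairs hapart
  clear hapart
  have r_pm : q.mem.readLE (addr (u.reg .r9).toNat) 4 = i := by
    rw [addr_toNat, hout (u.reg .r9) e1 e2 e3 pce.symm pde.symm]
    exact hmode
  have r_ls : q.mem.i32 (u.reg .rsi).toNat = sint32 (s.mem.readLE (u.reg .rsi) 4) := by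
    rw [Mem.i32_def]
    unfold Mem.u32
    rw [addr_toNat, hout (u.reg .rsi) a1 a2 a3 pac pad]
  have r_le : q.mem.i32 (u.reg .rdx).toNat = sint32 (s.mem.readLE (u.reg .rdx) 4) := by
    rw [Mem.i32_def]
    unfold Mem.u32
    rw [addr_toNat, hout (u.reg .rdx) b1 b2 b3 pbc pbd]
  have r_rs : q.mem.i32 (u.reg .rcx).toNat = sint32 v1 := by
    rw [Mem.i32_def]
    unfold Mem.u32
    rw [addr_toNat]
    have e : q.mem.readLE (u.reg .rcx) 4 = v1 := by
      clear pac pad pbc pbd pce pde hoff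
      rw [q_mem]
      u_read
    rw [e]
  have r_re : q.mem.i32 (u.reg .r8).toNat = sint32 v2 := by
    rw [Mem.i32_def]
    unfold Mem.u32
    rw [addr_toNat]
    have e : q.mem.readLE (u.reg .r8) 4 = v2 := by
      clear pac pad pbc pbd pce pde hoff
      rw [q_mem]
      u_read
    rw [e]
  have r_mc : stb_vorbis.mode_count q.mem (u.reg .rdi).toNat = stb_vorbis.mode_count u.mem (u.reg .rdi).toNat := by
    simp only [vacc, voff]
    rw [Mem.i32_def, Mem.i32_def]
    unfold Mem.u32
    rw [hfield 480 4 (by omega) (by omega)]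
  have r_flag : q.mem.readLE (addr ((u.reg .rdi).toNat + 484 + 6 * i)) 1 = bf := by
    have e := hfield (484 + 6 * i) 1 (by omega) (by omega)
    rw [← Nat.add_assoc] at e
    rw [e]
    exact hflag
  have r_b0 : stb_vorbis.blocksize_0 q.mem (u.reg .rdi).toNat = sint32 (u.mem.readLE (u.reg .rdi + 152) 4) := by
    simp only [vacc, voff]
    rw [Mem.i32_def]
    unfold Mem.u32
    rw [hfield 152 4 (by omega) (by omega)]
    exact congrArg sint32 (readLE_field u.mem (u.reg .rdi) 152 4).symm
  have r_b1 : stb_vorbis.blocksize_1 q.mem (u.reg .rdi).toNat = sint32 (u.mem.readLE (u.reg .rdi + 156) 4) := by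
    simp only [vacc, voff]
    rw [Mem.i32_def]
    unfold Mem.u32
    rw [hfield 156 4 (by omega) (by omega)]
    exact congrArg sint32 (readLE_field u.mem (u.reg .rdi) 156 4).symm
  have hdm : Top.DecodedMode q.mem (u.reg .rdi).toNat (u.reg .rsi).toNat (u.reg .rdx).toNat (u.reg .rcx).toNat
      (u.reg .r8).toNat (u.reg .r9).toNat := by
    refine dm_of_reads (n := n) hilt.1 r_pm ?_ r_flag r_b0 r_b1 ?_ ?_ ?_ ?_
    · rw [r_mc]
      exact hilt.2
    · intro h0
      rw [hnshort h0]
    · intro h1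
      rw [hnlong h1]
    · rw [r_ls, r_le]
      exact hleft
    · rw [r_rs, r_re]
      exact hright
  have hres : s32 (q.reg .rax) = 1 := by
    rw [q_rax]
    decide
  exact
    { rip := q_rip, rsp := q_rsp, kept := q_kept, code := hfrq.code, same := hfrq.same, un := hfrq.un,
      s0 := hfrq.s0, s1 := hfrq.s1, s2 := hfrq.s2, s3 := hfrq.s3, s4 := hfrq.s4, s5 := hfrq.s5, s6 := hfrq.s6,
      df := hfrq.df, mx := hfrq.mx, bits := hfrq.bits, cbs := hfrq.cbs, cbe := hfrq.cbe,
      res := Or.inr hres, dm := fun _ => hdm }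

end Vorbis.Spec.vorbis_decode_initial_8
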